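-- pv_equiv track=rewrite | github.com/Propolisss/home_code-python- | kege/23/25.py | f
-- ===== SOURCE A (Python) =====
-- def f(start, end, count):
--     count += (start % 2 == 0)
--     if start > end:
--         return 0
--     elif start == end:
--         return count == 6
--     else:
--         return f(start + 1, end, count) + f(start + 3, end, count) + f(start + 5, end, count)
-- ===== SOURCE B (Python) =====
-- def f(start, end, count):
--     # Bottom-up DP over (position, remaining evens needed) instead of A's 3-way recursion.
--     if start > end:
--         return 0
--     n = end - start
--     K = 6 - count
--     if K < 0 or K > n + 1:
--         return 0
--     rows = []  # rows[j][k] = number of good completions from position pos+1+j needing k more even visits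
--     pos = end
--     while pos >= start:
--         e = 1 if pos % 2 == 0 else 0
--         row = []
--         for k in range(K + 1):
--             kk = k - e
--             if kk < 0:
--                 row.append(0)
--             elif pos == end:
--                 row.append(1 if kk == 0 else 0)
--             else:
--                 t = 0
--                 for off in (0, 2, 4):  # steps of 1, 3, 5
--                     if off < len(rows):
--                         t += rows[off][kk]
--                 row.append(t)
--         rows.insert(0, row)
--         pos -= 1
--     return rows[0][K]
-- ===== Notes on version B (the rewrite author's own statement) =====
-- stated objective: alternative
-- what changed: Replaced A's exponential 3-way recursion with a bottom-up DP table over (position, remaining even-visits needed); Pre_ excludes start == end, where A returns a Python bool instead of an int (B returns the 0/1 int), and spans beyond Python's recursion limit, where A raises RecursionError.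
-- outside the precondition, e.g. on f(0, 0, 0): A returns False, B returns 0; on f(1, 1, 6): A returns True, B returns 1
import Mathlib
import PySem

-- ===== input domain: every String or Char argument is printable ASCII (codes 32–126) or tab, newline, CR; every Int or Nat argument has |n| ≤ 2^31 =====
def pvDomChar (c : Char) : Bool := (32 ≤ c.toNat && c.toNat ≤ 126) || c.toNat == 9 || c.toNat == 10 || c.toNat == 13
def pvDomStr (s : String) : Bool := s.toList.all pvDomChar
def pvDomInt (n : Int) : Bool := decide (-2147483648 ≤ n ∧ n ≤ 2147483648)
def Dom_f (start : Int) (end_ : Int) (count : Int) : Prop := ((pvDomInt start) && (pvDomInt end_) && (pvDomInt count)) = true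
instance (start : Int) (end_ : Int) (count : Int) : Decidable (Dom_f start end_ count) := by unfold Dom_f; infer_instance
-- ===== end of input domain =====

-- B replaces A's 3-way recursion with a bottom-up DP table over (position, remaining even visits).

-- ===== PORT A =====
def f (start : Int) (end_ : Int) (count : Int) : Int :=
  let c := count + (if PySem.Int.mod start 2 = 0 then 1 else 0)
  if start > end_ then 0
  else if start = end_ then (if c = 6 then 1 else 0)
  else f (start + 1) end_ c + f (start + 3) end_ c + f (start + 5) end_ c
termination_by (end_ - start).toNat
decreasing_by all_goals omega

-- ===== PORT B =====
-- row for position `pos`: entry k = number of good completions needing k more even visits.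
-- `rows.getD off [] |>.getD kk 0`: an out-of-range outer lookup yields 0, exactly Source B's
-- `if off < len(rows)` guard (inner index kk is always in range in Source B).
def bRow (end_ : Int) (Kn : Nat) (rows : List (List Int)) (pos : Int) : List Int :=
  let e : Int := if PySem.Int.mod pos 2 = 0 then 1 else 0
  (List.range (Kn + 1)).map (fun (k : Nat) =>
    let kk : Int := (k : Int) - e
    if kk < 0 then 0
    else if pos = end_ then (if kk = 0 then 1 else 0)
    else ((rows.getD 0 []).getD kk.toNat 0)
       + ((rows.getD 2 []).getD kk.toNat 0)
       + ((rows.getD 4 []).getD kk.toNat 0))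

-- `bRows end_ Kn i` = the `rows` list after the first i iterations of Source B's while loop
def bRows (end_ : Int) (Kn : Nat) : Nat → List (List Int)
  | 0 => []
  | i + 1 => bRow end_ Kn (bRows end_ Kn i) (end_ - i) :: bRows end_ Kn i

def f_alt (start : Int) (end_ : Int) (count : Int) : Int :=
  if start > end_ then 0
  else
    let n := (end_ - start).toNat
    let K := 6 - count
    if K < 0 ∨ K > (n : Int) + 1 then 0
    else ((bRows end_ K.toNat (n + 1)).getD 0 []).getD K.toNat 0

-- ===== PRECONDITION & SPEC =====
-- Pre_ excludes start == end_, where A returns a Python bool (True/False) rather than an int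
-- (B returns the corresponding 0/1 int there), and spans deeper than Python's recursion limit,
-- where A raises RecursionError (its leftmost recursion chain has depth end - start).
def Pre_f (start : Int) (end_ : Int) (count : Int) : Prop := start ≠ end_ ∧ end_ - start ≤ 900
instance (start : Int) (end_ : Int) (count : Int) : Decidable (Pre_f start end_ count) := by unfold Pre_f; infer_instance
def pvWitness_f : Int × Int × Int := (0, 4, 2)
def Spec_f (start : Int) (end_ : Int) (count : Int) (out : Int) : Prop := out = f_alt start end_ count
instance (start : Int) (end_ : Int) (count : Int) (out : Int) : Decidable (Spec_f start end_ count out) := by unfold Spec_f; infer_instance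

-- ===== CLAIM (what is proved, stated in full; the proofs are below) =====
def Claim_equal_f : Prop := ∀ (start : Int) (end_ : Int) (count : Int), Dom_f start end_ count → Pre_f start end_ count → Spec_f start end_ count (f start end_ count)
theorem f_zero_of_gt : ∀ (n : Nat) (start end_ count : Int), (end_ - start).toNat = n → 6 < count → f start end_ count = 0 := by
  intro n
  induction n using Nat.strong_induction_on with
  | _ n ih =>
    intro start end_ count hn h
    rw [f]
    split_ifs with h1 h2 <;> first
      | rfl
      | omega
      | (rw [ih (end_ - (start+1)).toNat (by omega) _ _ _ rfl (by omega),
             ih (end_ - (start+3)).toNat (by omega) _ _ _ rfl (by omega),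
             ih (end_ - (start+5)).toNat (by omega) _ _ _ rfl (by omega)]; norm_num)

theorem f_zero_of_small : ∀ (n : Nat) (start end_ count : Int), (end_ - start).toNat = n →
    ¬ start > end_ → (6:Int) - count > (end_ - start) + 1 → f start end_ count = 0 := by
  intro n
  induction n using Nat.strong_induction_on with
  | _ n ih =>
    intro start end_ count hn h1 h2
    have step : ∀ (d c' : Int), 1 ≤ d → c' ≤ count + 1 → f (start + d) end_ c' = 0 := by
      intro d c' hd hc'
      by_cases hg : start + d > end_
      · rw [f]; simp [hg]
      · exact ih (end_ - (start + d)).toNat (by omega) _ _ _ rfl hg (by omega)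
    rw [f]
    split_ifs with g1 g2 <;> first
      | rfl
      | omega
      | (rw [step 1 _ (by omega) (by omega),
             step 3 _ (by omega) (by omega),
             step 5 _ (by omega) (by omega)]; norm_num)

theorem bRows_length (end_ : Int) (Kn : Nat) (i : Nat) : (bRows end_ Kn i).length = i := by
  induction i with
  | zero => rfl
  | succ i ih => simp [bRows, ih]
theorem bRows_invariant (end_ : Int) (Kn : Nat) : ∀ (i : Nat), ∀ j < i, ∀ k ≤ Kn,
    ((bRows end_ Kn i).getD j []).getD k 0 = f (end_ - (i : Int) + 1 + (j : Int)) end_ (6 - (k : Int)) := by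
  intro i
  induction i with
  | zero => intro j hj; omega
  | succ i ih =>
    intro j hj k hk
    match j with
    | Nat.succ j' =>
      have hj' : j' < i := by omega
      rw [bRows, List.getD_cons_succ, ih j' hj' k hk]
      congr 1
      push_cast; ring
    | 0 =>
      have hpos : end_ - ((i+1 : Nat) : Int) + 1 + ((0:Nat) : Int) = end_ - (i : Int) := by push_cast; ring
      rw [bRows, hpos]
      set pos := end_ - (i : Int) with hposd
      show (bRow end_ Kn (bRows end_ Kn i) pos).getD k 0 = _
      rw [bRow]
      have hkr : k < Kn + 1 := by omega
      rw [List.getD_eq_getElem?_getD, List.getElem?_map, List.getElem?_range hkr]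
      simp only [Option.map_some, Option.getD_some]
      have hple : pos ≤ end_ := by omega
      have hlk : ∀ off : Nat, off < 5 → ∀ kk c : Int, 0 ≤ kk → kk ≤ (k:Int) → c = 6 - kk →
          ((bRows end_ Kn i).getD off []).getD kk.toNat 0 = f (pos + 1 + (off : Int)) end_ c := by
        intro off hoff kk c hkk hkle hc
        by_cases ho : off < i
        · rw [ih off ho kk.toNat (by omega)]
          congr 1
          rw [Int.toNat_of_nonneg hkk]; omega
        · rw [show (bRows end_ Kn i).getD off [] = [] from
              List.getD_eq_default _ _ (by rw [bRows_length]; omega)]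
          rw [show ([] : List Int).getD kk.toNat 0 = 0 from rfl]
          rw [f, if_pos (by omega : pos + 1 + (off:Int) > end_)]
      by_cases hm : PySem.Int.mod pos 2 = 0
      · simp only [hm, if_pos]
        by_cases hk0 : (k : Int) - 1 < 0
        · rw [if_pos hk0, f]
          simp only [hm, if_pos]
          rw [if_neg (by omega : ¬ pos > end_)]
          by_cases he : pos = end_
          · rw [if_pos he, if_neg (by omega : ¬ 6 - (k:Int) + 1 = 6)]
          · rw [if_neg he,
                f_zero_of_gt _ (pos+1) end_ _ rfl (by omega),
                f_zero_of_gt _ (pos+3) end_ _ rfl (by omega),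
                f_zero_of_gt _ (pos+5) end_ _ rfl (by omega)]
            norm_num
        · rw [if_neg hk0]
          by_cases he : pos = end_
          · rw [if_pos he, f]
            simp only [hm, if_pos]
            rw [if_neg (by omega : ¬ pos > end_), if_pos he]
            split_ifs <;> omega
          · rw [if_neg he, f]
            simp only [hm, if_pos]
            rw [if_neg (by omega : ¬ pos > end_), if_neg he]
            rw [show pos + 1 = pos + 1 + ((0:Nat):Int) by push_cast; ring,
                show pos + 3 = pos + 1 + ((2:Nat):Int) by push_cast; ring,
                show pos + 5 = pos + 1 + ((4:Nat):Int) by push_cast; ring,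
                ← hlk 0 (by omega) ((k:Int)-1) _ (by omega) (by omega) (by ring),
                ← hlk 2 (by omega) ((k:Int)-1) _ (by omega) (by omega) (by ring),
                ← hlk 4 (by omega) ((k:Int)-1) _ (by omega) (by omega) (by ring)]
      · simp only [hm, if_false]
        rw [if_neg (by omega : ¬ (k:Int) - 0 < 0)]
        by_cases he : pos = end_
        · rw [if_pos he, f]
          simp only [hm, if_false]
          rw [if_neg (by omega : ¬ pos > end_), if_pos he]
          split_ifs <;> omega
        · rw [if_neg he, f]
          simp only [hm, if_false]
          rw [if_neg (by omega : ¬ pos > end_), if_neg he]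
          rw [show pos + 1 = pos + 1 + ((0:Nat):Int) by push_cast; ring,
              show pos + 3 = pos + 1 + ((2:Nat):Int) by push_cast; ring,
              show pos + 5 = pos + 1 + ((4:Nat):Int) by push_cast; ring,
              ← hlk 0 (by omega) ((k:Int)-0) _ (by omega) (by omega) (by ring),
              ← hlk 2 (by omega) ((k:Int)-0) _ (by omega) (by omega) (by ring),
              ← hlk 4 (by omega) ((k:Int)-0) _ (by omega) (by omega) (by ring)]

theorem f_spec : Claim_equal_f := by
  unfold Claim_equal_f
  intro start end_ count _ _
  unfold Spec_f f_alt
  by_cases h1 : start > end_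
  · rw [if_pos h1, f, if_pos h1]
  · rw [if_neg h1]
    by_cases h2 : 6 - count < 0 ∨ 6 - count > ((end_ - start).toNat : Int) + 1
    · rw [if_pos h2]
      rcases h2 with h2 | h2
      · exact f_zero_of_gt _ start end_ count rfl (by omega)
      · exact f_zero_of_small _ start end_ count rfl h1 (by omega)
    · rw [if_neg h2]
      have h3 := bRows_invariant end_ (6 - count).toNat ((end_ - start).toNat + 1) 0 (by omega)
        (6 - count).toNat (le_refl _)
      rw [show end_ - (((end_ - start).toNat + 1 : Nat) : Int) + 1 + ((0:Nat) : Int) = start by push_cast; omega,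
          show (6 : Int) - (((6 - count).toNat : Nat) : Int) = count by omega] at h3
      exact h3.symm
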